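-- pv_equiv track=rewrite | github.com/Skyparker0/AllLocalProgrammingProjects | Cool Projects/Google interview.py | phone_numbers
-- ===== SOURCE A (Python) =====
-- numberPairs = {
--     0:[4,6],
--     1:[8,6],
--     2:[7,9],
--     3:[4,8],
--     4:[9,3,0],
--     5:[],
--     6:[7,1,0],
--     7:[2,6],
--     8:[1,3],
--     9:[4,2]
--     }
--
-- def phone_numbers(startNum, length):
--     if length == 1:
--         return [str(startNum)]
--     else:
--         result = []
--         for miniList in [phone_numbers(x,length-1)  for x in numberPairs[startNum]]:
--             result.extend([str(startNum) + miniList[x] for x in range(len(miniList))])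
--         return result
-- ===== SOURCE B (Python) =====
-- numberPairs = {
--     0:[4,6],
--     1:[8,6],
--     2:[7,9],
--     3:[4,8],
--     4:[9,3,0],
--     5:[],
--     6:[7,1,0],
--     7:[2,6],
--     8:[1,3],
--     9:[4,2]
--     }
--
-- def phone_numbers(startNum, length):
--     results = []
--     stack = [(startNum, length, '')]
--     while stack:
--         node, k, pre = stack.pop()
--         if k == 1:
--             results.append(pre + str(node))
--         else:
--             grown = pre + str(node)
--             for x in reversed(numberPairs[node]):
--                 stack.append((x, k - 1, grown))
--     return results
-- ===== Notes on version B (the rewrite author's own statement) =====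
-- stated objective: alternative
-- what changed: Replaces A's bottom-up recursion (each call returns the suffix lists of its neighbours, which the caller prefixes and concatenates level by level) with an iterative depth-first search over an explicit stack of (node, remaining length, prefix) entries that appends each finished path to a results list.
import Mathlib
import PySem

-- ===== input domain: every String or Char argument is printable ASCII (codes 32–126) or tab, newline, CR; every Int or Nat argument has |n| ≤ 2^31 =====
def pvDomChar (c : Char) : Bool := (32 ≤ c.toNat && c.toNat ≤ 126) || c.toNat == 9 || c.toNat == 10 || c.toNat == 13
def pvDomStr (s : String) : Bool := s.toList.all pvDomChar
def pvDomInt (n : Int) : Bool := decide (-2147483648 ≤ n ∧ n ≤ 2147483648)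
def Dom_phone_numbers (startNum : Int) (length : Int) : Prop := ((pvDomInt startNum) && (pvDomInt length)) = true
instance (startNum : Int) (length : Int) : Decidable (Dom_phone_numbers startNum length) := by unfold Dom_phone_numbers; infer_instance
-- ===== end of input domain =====

-- B replaces A's bottom-up recursion (each level prefixes and concatenates whole suffix lists)
-- by an iterative DFS over an explicit stack that threads the accumulated prefix.

-- ===== PORT A =====
-- the module-level dict numberPairs
def numberPairsD : PySem.Dict Int (List Int) :=
  PySem.Dict.ofList [(0, [4,6]), (1, [8,6]), (2, [7,9]), (3, [4,8]), (4, [9,3,0]),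
                     (5, []), (6, [7,1,0]), (7, [2,6]), (8, [1,3]), (9, [4,2])]

-- A's recursion on the Int `length`, made total with fuel (length - 1).toNat; inside
-- Pre_ the fuel never runs out, so this is A's code step for step (KeyError on a
-- startNum outside the dict and the infinite recursion for length ≤ 0 with neighbours
-- are outside Pre_).
def phoneGo : Nat → Int → Int → List String
  | fuel, startNum, length =>
    if length == 1 then [PySem.Int.toStr startNum]
    else
      match fuel with
      | 0 => []
      | fuel + 1 =>
        (((numberPairsD.get? startNum).getD []).map (fun x => phoneGo fuel x (length - 1))).foldl
          (fun result miniList =>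
            result ++ miniList.map (fun s => PySem.Int.toStr startNum ++ s)) []

def phone_numbers (startNum : Int) (length : Int) : List String :=
  phoneGo (length - 1).toNat startNum length

-- ===== PORT B =====
-- measure for the while-loop's termination (proof device only, not part of B's code)
def entryMeasure (e : Int × Int × String) : Nat := 4 ^ e.2.1.toNat
def stackMeasure (st : List (Int × Int × String)) : Nat := (st.map entryMeasure).sum

-- Python's 'for x in reversed(l): stack.append(c x)' on a top-at-head stack
lemma foldl_push {α β : Type} (l : List α) (c : α → β) (st : List β) :
    l.reverse.foldl (fun s x => c x :: s) st = l.map c ++ st := by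
  induction l generalizing st with
  | nil => simp
  | cons a t ih => simp [List.foldl_append, ih]

lemma neighbors_len_le (node : Int) :
    ((numberPairsD.get? node).getD []).length ≤ 3 := by
  cases h : numberPairsD.get? node with
  | none => simp
  | some v =>
    have hv : (node, v) ∈ numberPairsD.items := PySem.Dict.mem_items_of_get?_eq_some numberPairsD h
    have hvv : v ∈ numberPairsD.items.map Prod.snd := List.mem_map.mpr ⟨(node, v), hv, rfl⟩
    have hall : ∀ w ∈ numberPairsD.items.map Prod.snd, w.length ≤ 3 := by decide
    simpa using hall v hvv

lemma stackMeasure_cons (e : Int × Int × String) (st : List (Int × Int × String)) :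
    stackMeasure (e :: st) = entryMeasure e + stackMeasure st := by
  simp [stackMeasure]

lemma stackMeasure_append (a b : List (Int × Int × String)) :
    stackMeasure (a ++ b) = stackMeasure a + stackMeasure b := by
  simp [stackMeasure]

lemma push_lt (node k : Int) (pre grown : String) (stack : List (Int × Int × String))
    (hk0 : ¬k ≤ 0) :
    stackMeasure (((numberPairsD.get? node).getD []).map (fun x => (x, k - 1, grown)) ++ stack)
      < stackMeasure ((node, k, pre) :: stack) := by
  rw [stackMeasure_append, stackMeasure_cons]
  have hlen := neighbors_len_le node
  have h1 : stackMeasure (((numberPairsD.get? node).getD []).map (fun x => (x, k - 1, grown)))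
      ≤ 3 * 4 ^ (k - 1).toNat := by
    unfold stackMeasure
    rw [List.map_map]
    have he : ((fun e => entryMeasure e) ∘ fun x : Int => (x, k - 1, grown))
        = fun _ => 4 ^ (k - 1).toNat := by
      funext x; simp [entryMeasure]
    rw [he, List.map_const', List.sum_replicate, smul_eq_mul]
    exact Nat.mul_le_mul_right _ hlen
  have hk : k.toNat = (k - 1).toNat + 1 := by omega
  have h2 : 3 * 4 ^ (k - 1).toNat < entryMeasure (node, k, pre) := by
    unfold entryMeasure
    simp only [hk, pow_succ]
    have : 0 < 4 ^ (k - 1).toNat := Nat.pow_pos (by norm_num)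
    omega
  omega

-- B's while-loop over the explicit stack (top = head). The 'k ≤ 0' arm is a pure
-- termination guard: there CPython recurses without returning (the inputs lie outside
-- Pre_, except node 5 / the popped entry has no neighbours, where pushing nothing is
-- exactly what Python does too).
def loopB : List (Int × Int × String) → List String → List String
  | [], results => results
  | (node, k, pre) :: stack, results =>
    if k == 1 then loopB stack (results ++ [pre ++ PySem.Int.toStr node])
    else if k ≤ 0 then loopB stack results
    else
      loopB ((((numberPairsD.get? node).getD []).reverse).foldl
          (fun s x => (x, k - 1, pre ++ PySem.Int.toStr node) :: s) stack) results
  termination_by st _ => stackMeasure st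
  decreasing_by
  · simp [stackMeasure_cons, entryMeasure]
  · simp [stackMeasure_cons, entryMeasure]
  · rw [foldl_push]
    exact push_lt _ _ _ _ _ (by assumption)

def phone_numbers_alt (startNum : Int) (length : Int) : List String :=
  loopB [(startNum, length, "")] []

-- ===== PRECONDITION & SPEC =====
-- A returns for length = 1 on any startNum; otherwise it raises KeyError for a
-- startNum outside 0..9 and recurses forever for length ≤ 0, except that
-- startNum = 5 (no neighbours) still returns [] for length ≤ 0; Pre_ admits
-- exactly the inputs where A returns.
def Pre_phone_numbers (startNum : Int) (length : Int) : Prop :=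
  length = 1 ∨ ((0 ≤ startNum ∧ startNum ≤ 9) ∧ (1 ≤ length ∨ startNum = 5))
instance (startNum : Int) (length : Int) : Decidable (Pre_phone_numbers startNum length) := by
  unfold Pre_phone_numbers; infer_instance

def pvWitness_phone_numbers : Int × Int := (1, 3)

def Spec_phone_numbers (startNum : Int) (length : Int) (out : List String) : Prop :=
  out = phone_numbers_alt startNum length
instance (startNum : Int) (length : Int) (out : List String) :
    Decidable (Spec_phone_numbers startNum length out) := by
  unfold Spec_phone_numbers; infer_instance

-- ===== CLAIM (what is proved, stated in full; the proofs are below) =====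
def Claim_equal_phone_numbers : Prop := ∀ (startNum : Int) (length : Int), Dom_phone_numbers startNum length → Pre_phone_numbers startNum length → Spec_phone_numbers startNum length (phone_numbers startNum length)

-- ===== LEMMAS AND PROOFS =====

-- A's extend loop is a flatMap
lemma foldl_extend {α β : Type} (l : List α) (f : α → List β) (init : List β) :
    l.foldl (fun r m => r ++ f m) init = init ++ l.flatMap f := by
  induction l generalizing init with
  | nil => simp
  | cons x xs ih => simp [List.foldl_cons, ih]

-- what one stack entry contributes to the final result: A's value, prefixed
def contrib (e : Int × Int × String) : List String :=
  (phoneGo (e.2.1 - 1).toNat e.1 e.2.1).map (fun s => e.2.2 ++ s)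

-- main invariant: the stack machine emits, after the accumulated results, exactly
-- the concatenation of A's (prefixed) values of the pending entries
lemma loopB_eq (st : List (Int × Int × String)) (res : List String) :
    loopB st res = res ++ st.flatMap contrib := by
  induction st, res using loopB.induct with
  | case1 res => simp [loopB]
  | case2 node k pre stack res hk ih =>
    rw [loopB]
    simp only [hk, if_true]
    rw [ih]
    have hc : contrib (node, k, pre) = [pre ++ PySem.Int.toStr node] := by
      have : k = 1 := by simpa using hk
      subst this
      simp [contrib, phoneGo]
    simp [hc]
  | case3 node k pre stack res hk h0 ih =>
    rw [loopB]
    simp only [hk, if_pos h0]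
    rw [ih]
    have hc : contrib (node, k, pre) = [] := by
      have hne : ¬ k = 1 := by simpa using hk
      have h1 : (k - 1).toNat = 0 := by omega
      simp [contrib, phoneGo, h1, hne]
    simp [hc]
  | case4 node k pre stack res hk h0 ih =>
    have hne : ¬ k = 1 := by simpa using hk
    have hfuel : (k - 1).toNat = (k - 1 - 1).toNat + 1 := by omega
    have hc : contrib (node, k, pre)
        = (((numberPairsD.get? node).getD []).map (fun x => (x, k - 1, pre ++ PySem.Int.toStr node))).flatMap contrib := by
      simp only [contrib, hfuel]
      rw [phoneGo]
      simp only [hne, beq_iff_eq, if_false]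
      rw [List.foldl_map, foldl_extend, List.nil_append, List.map_flatMap, List.flatMap_map]
      apply List.flatMap_congr
      intro x _
      simp only [contrib, List.map_map, Function.comp_def, String.append_assoc]
    rw [loopB, if_neg hk, if_neg h0, ih, foldl_push, List.flatMap_append,
        List.flatMap_cons, hc]

-- ===== VERDICT (by name: the statement is the Claim_ definition above) =====
theorem phone_numbers_spec : Claim_equal_phone_numbers := by
  intro startNum length _ _
  unfold Spec_phone_numbers phone_numbers phone_numbers_alt
  rw [loopB_eq]
  simp [contrib]
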